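-- pv_equiv track=rewrite | github.com/Danceiny/HackGirlfriend | Temp/markov.py | buildWordDict
-- ===== SOURCE A (Python) =====
-- def buildWordDict(text):
--     #{word_a : {word_b : 2, word_c : 1, word_d : 1},
--     # word_e : {word_b : 5, word_d : 2},...}
--
--     #Remove newlines and quotes
--     text = text.replace("\n", " ");
--     text = text.replace("\"", "");
--     #Make sure punctuation marks are treated as their own "words,"
--     #so that they will be included in the Markov chain
--     punctuation = [',','.',';',':']
--     for symbol in punctuation:
--         text = text.replace(symbol, " "+symbol+" ");
--     words = text.split(" ")
--     #Filter out empty words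
--     words = [word for word in words if word != ""]
--     wordDict = {}
--     for i in range(1, len(words)):
--         if words[i-1] not in wordDict:
--         #Create a new dictionary for this word
--             wordDict[words[i-1]] = {}
--         if words[i] not in wordDict[words[i-1]]:
--             wordDict[words[i-1]][words[i]] = 0
--         wordDict[words[i-1]][words[i]] = wordDict[words[i-1]][words[
--     i]] + 1
--     return wordDict
-- ===== SOURCE B (Python) =====
-- def buildWordDict(text):
--     # Same cleaning as the original, written as one replace chain
--     cleaned = (text.replace("\n", " ").replace("\"", "")
--                .replace(",", " , ").replace(".", " . ")
--                .replace(";", " ; ").replace(":", " : "))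
--     words = [w for w in cleaned.split(" ") if w != ""]
--     pairs = list(zip(words, words[1:]))
--     # flat count table over adjacent bigrams
--     counts = {}
--     for pair in pairs:
--         counts[pair] = counts.get(pair, 0) + 1
--     # assemble the nested dict declaratively from the ordered-distinct lists
--     prevs = list(dict.fromkeys(p for p, _ in pairs))
--     uniq = list(dict.fromkeys(pairs))
--     return {p: {c: counts[(q, c)] for (q, c) in uniq if q == p} for p in prevs}
-- ===== Notes on version B (the rewrite author's own statement) =====
-- stated objective: alternative
-- what changed: Instead of incrementally updating a nested dict while scanning word indices, B builds a flat bigram counter in one pass and then assembles the nested result declaratively from the ordered-distinct lists of prev-words and bigrams (dict.fromkeys) with lookups into the flat counter.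
import Mathlib
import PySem

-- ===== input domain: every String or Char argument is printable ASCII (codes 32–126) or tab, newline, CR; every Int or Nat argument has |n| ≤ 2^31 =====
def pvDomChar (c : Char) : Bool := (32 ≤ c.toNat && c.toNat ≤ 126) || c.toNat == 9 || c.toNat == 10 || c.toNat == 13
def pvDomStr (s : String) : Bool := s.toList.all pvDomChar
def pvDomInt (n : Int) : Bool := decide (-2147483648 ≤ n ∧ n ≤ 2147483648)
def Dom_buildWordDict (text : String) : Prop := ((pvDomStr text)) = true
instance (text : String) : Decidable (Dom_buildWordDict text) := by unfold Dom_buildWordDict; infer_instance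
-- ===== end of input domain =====

-- B replaces A's incremental nested-dict update with a flat one-pass bigram counter plus a
-- declarative assembly from the ordered-distinct prev/bigram lists (objective: alternative).

-- ===== PORT A =====
-- A's preprocessing (replace/split/filter), exactly A's statements in order
def pvWordsA (text : String) : List String :=
  let text1 := PySem.Str.replace text "\n" " "
  let text2 := PySem.Str.replace text1 "\"" ""
  let punctuation : List String := [",", ".", ";", ":"]
  let text3 := punctuation.foldl (fun t symbol => PySem.Str.replace t symbol (" " ++ symbol ++ " ")) text2
  let words := (PySem.Str.split? text3 " ").getD []   -- sep " " ≠ "", so split? is always `some`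
  words.filter (fun word => word != "")

-- A's loop body: the two membership tests and the nested increment, step for step
def pvUpdA (wd : PySem.Dict String (PySem.Dict String Int)) (prev cur : String) :
    PySem.Dict String (PySem.Dict String Int) :=
  let wd1 := if wd.contains prev then wd else wd.insert prev PySem.Dict.empty
  let inner := wd1.getD prev PySem.Dict.empty
  let inner1 := if inner.contains cur then inner else inner.insert cur 0
  wd1.insert prev (inner1.insert cur (inner1.getD cur 0 + 1))

def buildWordDict (text : String) : List (String × List (String × Int)) :=
  let words := pvWordsA text
  let wordDict := (PySem.List.pyRange 1 (words.length : Int) 1).foldl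
    (fun wd i => pvUpdA wd (PySem.List.pyGetD words (i - 1) "") (PySem.List.pyGetD words i ""))
    PySem.Dict.empty
  wordDict.items.map (fun kv => (kv.1, kv.2.items))

-- ===== PORT B =====
-- B: clean via one replace chain, count bigrams into a flat counter, then assemble the nested
-- table from the ordered-distinct lists (dict.fromkeys = PySem.List.dedup)
def buildWordDict_alt (text : String) : List (String × List (String × Int)) :=
  let cleaned := PySem.Str.replace (PySem.Str.replace (PySem.Str.replace (PySem.Str.replace
      (PySem.Str.replace (PySem.Str.replace text "\n" " ") "\"" "") "," " , ") "." " . ")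
      ";" " ; ") ":" " : "
  let words := ((PySem.Str.split? cleaned " ").getD []).filter (fun w => w != "")
  let pairs := words.zip (PySem.List.slice words (some 1) none)
  let counts := pairs.foldl (fun d pair => d.insert pair (d.getD pair 0 + 1)) PySem.Dict.empty
  let prevs := PySem.List.dedup (pairs.map Prod.fst)
  let uniq := PySem.List.dedup pairs
  prevs.map (fun p =>
    (p, (uniq.filter (fun q => q.1 == p)).map (fun q => (q.2, counts.getD q 0))))

-- ===== PRECONDITION & SPEC =====
def Spec_buildWordDict (text : String) (out : List (String × List (String × Int))) : Prop := out = buildWordDict_alt text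
instance (text : String) (out : List (String × List (String × Int))) : Decidable (Spec_buildWordDict text out) := by unfold Spec_buildWordDict; infer_instance

-- ===== CLAIM (what is proved, stated in full; the proofs are below) =====
def Claim_equal_buildWordDict : Prop := ∀ (text : String), Dom_buildWordDict text → Spec_buildWordDict text (buildWordDict text)

-- ===== LEMMAS AND PROOFS =====

-- common shape both ports are proved equal to: outer keys = distinct prevs in first-occurrence
-- order, inner keys = distinct bigrams in first-occurrence order, values = bigram counts
def pvOut (ws : List String) : List (String × List (String × Int)) :=
  let pairs := ws.zip ws.tail
  (PySem.Set.ofList (pairs.map Prod.fst)).map (fun p =>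
    (p, ((PySem.Set.ofList pairs).filter (fun q => q.1 == p)).map
      (fun q => (q.2, (pairs.count q : Int)))))

-- canonical dict form A's fold is proved equal to
def pvCanon (qs : List (String × String)) (v : String × String → Int) :
    PySem.Dict String (PySem.Dict String Int) :=
  PySem.Dict.mk ((PySem.Set.ofList (qs.map Prod.fst)).map (fun p =>
    (p, PySem.Dict.mk ((qs.filter (fun q => q.1 == p)).map (fun q => (q.2, v q))))))

theorem pv_mem_fst_ofList (ps : List (String × String)) (p : String) :
    p ∈ (PySem.Set.ofList ps).map Prod.fst ↔ p ∈ ps.map Prod.fst := by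
  constructor <;> intro h <;> obtain ⟨q, hq, rfl⟩ := List.mem_map.mp h
  · exact List.mem_map.mpr ⟨q, (PySem.Set.mem_ofList ps q).mp hq, rfl⟩
  · exact List.mem_map.mpr ⟨q, (PySem.Set.mem_ofList ps q).mpr hq, rfl⟩

theorem pv_ofList_map_ofList {α β : Type} [BEq α] [LawfulBEq α] [BEq β] [LawfulBEq β]
    (f : α → β) (l : List α) :
    PySem.Set.ofList ((PySem.Set.ofList l).map f) = PySem.Set.ofList (l.map f) := by
  induction l using List.reverseRecOn with
  | nil => rfl
  | append_singleton l a ih =>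
    rw [PySem.Set.ofList_append_singleton, List.map_append,
      show List.map f [a] = [f a] from rfl, PySem.Set.ofList_append_singleton]
    by_cases h : a ∈ PySem.Set.ofList l
    · rw [PySem.Set.add_of_mem h, ih, PySem.Set.add_of_mem]
      exact (PySem.Set.mem_ofList _ _).mpr
        (List.mem_map.mpr ⟨a, (PySem.Set.mem_ofList l a).mp h, rfl⟩)
    · rw [PySem.Set.add_of_not_mem h, List.map_append,
        show List.map f [a] = [f a] from rfl, PySem.Set.ofList_append_singleton, ih]

theorem pv_zip_aux {α : Type} (d a : α) (t : List α) :
    (List.range t.length).map (fun k => ((a :: t).getD k d, (a :: t).getD (k + 1) d))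
      = (a :: t).zip t := by
  induction t generalizing a with
  | nil => simp
  | cons b t' ih =>
    rw [show (b :: t').length = t'.length + 1 from rfl, List.range_succ_eq_map]
    simp only [List.map_cons, List.map_map, List.zip_cons_cons]
    congr 1
    rw [← ih b]
    apply List.map_congr_left
    intro k _
    simp [List.getD]

theorem pv_zip_tail (ws : List String) :
    (PySem.List.pyRange 1 (ws.length : Int) 1).map
      (fun i => (PySem.List.pyGetD ws (i - 1) "", PySem.List.pyGetD ws i ""))
      = ws.zip ws.tail := by
  cases ws with
  | nil => simp
  | cons a t =>
    rw [PySem.List.pyRange_one]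
    have hlen : (((a :: t).length : Int) - 1).toNat = t.length := by
      simp only [List.length_cons]; omega
    rw [hlen, List.map_map, show (a :: t).tail = t from rfl, ← pv_zip_aux "" a t]
    apply List.map_congr_left
    intro k _
    have h1 : (1 : Int) + (k : Int) - 1 = ((k : Nat) : Int) := by omega
    have h2 : (1 : Int) + (k : Int) = ((k + 1 : Nat) : Int) := by push_cast; ring
    simp only [Function.comp_def, h1]
    simp only [h2, PySem.List.pyGetD_natCast]

theorem pvCanon_contains (qs : List (String × String)) (v : String × String → Int) (p : String) :
    (pvCanon qs v).contains p = true ↔ p ∈ qs.map Prod.fst := by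
  unfold pvCanon
  rw [PySem.Dict.contains_mk, List.any_map]
  simp only [Function.comp_def, List.any_eq_true, beq_iff_eq, exists_eq_right]
  exact PySem.Set.mem_ofList _ _

theorem pvCanon_nodup_keys (qs : List (String × String)) (v : String × String → Int) :
    (pvCanon qs v).keys.Nodup := by
  unfold pvCanon
  rw [PySem.Dict.keys_mk, List.map_map]
  simp [Function.comp_def]

theorem pvCanon_getD (qs : List (String × String)) (v : String × String → Int) (p : String)
    (hp : p ∈ qs.map Prod.fst) :
    (pvCanon qs v).getD p PySem.Dict.empty
      = PySem.Dict.mk ((qs.filter (fun q => q.1 == p)).map (fun q => (q.2, v q))) := by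
  apply PySem.Dict.getD_of_mem_items
  · exact List.mem_map.mpr ⟨p, (PySem.Set.mem_ofList _ _).mpr hp, rfl⟩
  · exact pvCanon_nodup_keys qs v

theorem pvInner_nodup (qs : List (String × String)) (hq : qs.Nodup) (v : String × String → Int)
    (p : String) :
    (PySem.Dict.mk ((qs.filter (fun q => q.1 == p)).map (fun q => (q.2, v q)))
        : PySem.Dict String Int).keys.Nodup := by
  rw [PySem.Dict.keys_mk, List.map_map]
  apply List.Nodup.map_on _ (hq.filter _)
  intro x hx y hy hxy
  have hx1 : x.1 = p := by simpa using (List.mem_filter.mp hx).2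
  have hy1 : y.1 = p := by simpa using (List.mem_filter.mp hy).2
  exact Prod.ext (hx1.trans hy1.symm) (by simpa using hxy)

theorem pvInner_contains (qs : List (String × String)) (v : String × String → Int)
    (p c : String) :
    (PySem.Dict.mk ((qs.filter (fun q => q.1 == p)).map (fun q => (q.2, v q)))
        : PySem.Dict String Int).contains c = true ↔ (p, c) ∈ qs := by
  rw [PySem.Dict.contains_mk, List.any_map]
  simp only [Function.comp_def, List.any_eq_true, List.mem_filter, beq_iff_eq]
  constructor
  · rintro ⟨q, ⟨hq, h1⟩, h2⟩
    have : q = (p, c) := Prod.ext h1 h2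
    rwa [← this]
  · intro h; exact ⟨(p, c), ⟨h, rfl⟩, rfl⟩

theorem pvInner_getD (qs : List (String × String)) (hq : qs.Nodup) (v : String × String → Int)
    (p c : String) (h : (p, c) ∈ qs) :
    (PySem.Dict.mk ((qs.filter (fun q => q.1 == p)).map (fun q => (q.2, v q)))
        : PySem.Dict String Int).getD c 0 = v (p, c) := by
  apply PySem.Dict.getD_of_mem_items
  · exact List.mem_map.mpr ⟨(p, c), List.mem_filter.mpr ⟨h, by simp⟩, rfl⟩
  · exact pvInner_nodup qs hq v p

theorem pv_aloop_eq (ps : List (String × String)) :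
    ps.foldl (fun wd q => pvUpdA wd q.1 q.2) PySem.Dict.empty
      = pvCanon (PySem.Set.ofList ps) (fun q => (ps.count q : Int)) := by
  induction ps using List.reverseRecOn with
  | nil => rfl
  | append_singleton ps q0 ih =>
    obtain ⟨p0, c0⟩ := q0
    rw [List.foldl_append, ih]
    simp only [List.foldl_cons, List.foldl_nil]
    have hSnd : (PySem.Set.ofList ps).Nodup := PySem.Set.nodup_ofList ps
    have hv : ∀ q : String × String,
        (((ps ++ [(p0, c0)]).count q : Nat) : Int)
          = ((ps.count q : Nat) : Int) + (if q = (p0, c0) then 1 else 0) := by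
      intro q
      rw [List.count_append, List.count_singleton]
      push_cast
      by_cases h : q = (p0, c0)
      · simp [h]
      · have hne : ¬((p0, c0) = q) := fun hh => h hh.symm
        simp [h, hne]
    rw [PySem.Set.ofList_append_singleton]
    by_cases hp : p0 ∈ ps.map Prod.fst
    · have hpS : p0 ∈ (PySem.Set.ofList ps).map Prod.fst := (pv_mem_fst_ofList ps p0).mpr hp
      have hcont : (pvCanon (PySem.Set.ofList ps) (fun q => (ps.count q : Int))).contains p0 = true :=
        (pvCanon_contains _ _ p0).mpr hpS
      simp only [pvUpdA, hcont, if_true]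
      rw [pvCanon_getD _ _ p0 hpS]
      by_cases hq0 : (p0, c0) ∈ ps
      · -- both keys exist: pure increment
        have hq0S : (p0, c0) ∈ PySem.Set.ofList ps := (PySem.Set.mem_ofList ps _).mpr hq0
        have hic : (PySem.Dict.mk (((PySem.Set.ofList ps).filter (fun q => q.1 == p0)).map
            (fun q => (q.2, (ps.count q : Int)))) : PySem.Dict String Int).contains c0 = true :=
          (pvInner_contains _ _ p0 c0).mpr hq0S
        simp only [hic, if_true]
        rw [pvInner_getD _ hSnd _ p0 c0 hq0S]
        rw [PySem.Set.add_of_mem hq0S]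
        apply PySem.Dict.ext
        rw [PySem.Dict.items_insert_of_contains _ _ hcont]
        unfold pvCanon
        rw [List.map_map]
        apply List.map_congr_left
        intro p hpT
        by_cases hpp : p = p0
        · subst hpp
          simp only [Function.comp_def, beq_self_eq_true, if_pos]
          refine Prod.ext rfl ?_
          apply PySem.Dict.ext
          rw [PySem.Dict.items_insert_of_contains _ _ hic]
          rw [List.map_map]
          apply List.map_congr_left
          intro q hqf
          have hqm := List.mem_filter.mp hqf
          have hq1 : q.1 = p := by simpa using hqm.2
          by_cases hqc : q.2 = c0
          · have hqe : q = (p, c0) := Prod.ext hq1 hqc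
            subst hqe
            simp only [Function.comp_def, beq_self_eq_true, if_pos]
            rw [hv (p, c0), if_pos rfl]
          · have hbe : (q.2 == c0) = false := by simp [hqc]
            simp only [Function.comp_def, hbe, Bool.false_eq_true, ite_false]
            rw [hv q, if_neg (fun h => hqc (by rw [h])), add_zero]
        · have hbe : (p == p0) = false := by simp [hpp]
          simp only [Function.comp_def, hbe, Bool.false_eq_true, ite_false]
          refine Prod.ext rfl ?_
          refine congrArg PySem.Dict.mk ?_
          apply List.map_congr_left
          intro q hqf
          have hqm := List.mem_filter.mp hqf
          have hq1 : q.1 = p := by simpa using hqm.2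
          rw [hv q, if_neg (fun h => hpp (by rw [← hq1, h])), add_zero]
      · -- outer key exists, bigram fresh
        have hq0S : (p0, c0) ∉ PySem.Set.ofList ps := fun h => hq0 ((PySem.Set.mem_ofList ps _).mp h)
        have hic : (PySem.Dict.mk (((PySem.Set.ofList ps).filter (fun q => q.1 == p0)).map
            (fun q => (q.2, (ps.count q : Int)))) : PySem.Dict String Int).contains c0 = false :=
          Bool.eq_false_iff.mpr (fun h => hq0S ((pvInner_contains _ _ p0 c0).mp h))
        simp only [hic, Bool.false_eq_true, ite_false]
        rw [PySem.Dict.getD_insert_self, PySem.Dict.insert_insert_self]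
        rw [PySem.Set.add_of_not_mem hq0S]
        apply PySem.Dict.ext
        rw [PySem.Dict.items_insert_of_contains _ _ hcont]
        unfold pvCanon
        rw [show PySem.Set.ofList (((PySem.Set.ofList ps ++ [(p0, c0)]).map Prod.fst))
            = PySem.Set.ofList ((PySem.Set.ofList ps).map Prod.fst) by
          rw [List.map_append, show List.map Prod.fst [(p0, c0)] = [p0] from rfl,
            PySem.Set.ofList_append_singleton]
          exact PySem.Set.add_of_mem ((PySem.Set.mem_ofList _ _).mpr hpS)]
        rw [List.map_map]
        apply List.map_congr_left
        intro p hpT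
        by_cases hpp : p = p0
        · subst hpp
          simp only [Function.comp_def, beq_self_eq_true, if_pos]
          refine Prod.ext rfl ?_
          apply PySem.Dict.ext
          rw [PySem.Dict.items_insert_of_not_contains _ _ hic]
          rw [List.filter_append]
          simp only [List.filter_cons, List.filter_nil, beq_self_eq_true, if_pos,
            List.map_append, List.map_cons, List.map_nil]
          congr 1
          · apply List.map_congr_left
            intro q hqf
            have hqm := List.mem_filter.mp hqf
            have hq0' : q ≠ (p, c0) := fun h => hq0S (h ▸ hqm.1)
            rw [hv q, if_neg hq0', add_zero]
          · have : ps.count (p, c0) = 0 := List.count_eq_zero.mpr hq0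
            rw [hv (p, c0), if_pos rfl, this]
            norm_num
        · have hbe : (p == p0) = false := by simp [hpp]
          simp only [Function.comp_def, hbe, Bool.false_eq_true, ite_false]
          refine Prod.ext rfl ?_
          refine congrArg PySem.Dict.mk ?_
          rw [List.filter_append]
          have hpp0 : ¬(p0 = p) := fun h => hpp h.symm
          have hsing : [(p0, c0)].filter (fun q => q.1 == p) = [] := by simp [hpp0]
          rw [hsing, List.append_nil]
          apply List.map_congr_left
          intro q hqf
          have hqm := List.mem_filter.mp hqf
          have hq0' : q ≠ (p0, c0) := fun h => hq0S (h ▸ hqm.1)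
          rw [hv q, if_neg hq0', add_zero]
    · -- fresh outer key (hence fresh bigram)
      have hq0 : (p0, c0) ∉ ps := fun h => hp (List.mem_map.mpr ⟨(p0, c0), h, rfl⟩)
      have hq0S : (p0, c0) ∉ PySem.Set.ofList ps := fun h => hq0 ((PySem.Set.mem_ofList ps _).mp h)
      have hpS : p0 ∉ (PySem.Set.ofList ps).map Prod.fst := fun h => hp ((pv_mem_fst_ofList ps p0).mp h)
      have hcont : (pvCanon (PySem.Set.ofList ps) (fun q => (ps.count q : Int))).contains p0 = false :=
        Bool.eq_false_iff.mpr (fun h => hpS ((pvCanon_contains _ _ p0).mp h))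
      simp only [pvUpdA, hcont, Bool.false_eq_true, ite_false, PySem.Dict.getD_insert_self,
        PySem.Dict.contains_empty, PySem.Dict.insert_insert_self]
      rw [PySem.Set.add_of_not_mem hq0S]
      apply PySem.Dict.ext
      rw [PySem.Dict.items_insert_of_not_contains _ _ hcont]
      unfold pvCanon
      rw [List.map_append, show List.map Prod.fst [(p0, c0)] = [p0] from rfl,
        PySem.Set.ofList_append_singleton,
        PySem.Set.add_of_not_mem (fun h => hpS ((PySem.Set.mem_ofList _ _).mp h))]
      rw [List.map_append]
      congr 1
      · apply List.map_congr_left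
        intro p hpT
        have hpmem : p ∈ (PySem.Set.ofList ps).map Prod.fst := (PySem.Set.mem_ofList _ _).mp hpT
        have hpp0 : ¬(p0 = p) := fun h => hpS (h ▸ hpmem)
        refine Prod.ext rfl ?_
        refine congrArg PySem.Dict.mk ?_
        rw [List.filter_append]
        have hsing : [(p0, c0)].filter (fun q => q.1 == p) = [] := by simp [hpp0]
        rw [hsing, List.append_nil]
        apply List.map_congr_left
        intro q hqf
        have hqm := List.mem_filter.mp hqf
        have hq0' : q ≠ (p0, c0) := fun h => hq0S (h ▸ hqm.1)
        simp only [hv q, if_neg hq0', add_zero]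
      · have hfil : (PySem.Set.ofList ps).filter (fun q => q.1 == p0) = [] :=
          List.filter_eq_nil_iff.mpr (fun q hqm hbe =>
            hpS (List.mem_map.mpr ⟨q, hqm, by simpa using hbe⟩))
        simp only [List.map_cons, List.map_nil, List.filter_append, hfil, List.nil_append,
          List.filter_cons, beq_self_eq_true, if_pos, List.filter_nil]
        refine congrArg (fun x => [x]) (Prod.ext rfl ?_)
        apply PySem.Dict.ext
        rw [PySem.Dict.items_insert_of_not_contains _ _ (PySem.Dict.contains_empty c0)]
        have hcz : ps.count (p0, c0) = 0 := List.count_eq_zero.mpr hq0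
        simp [hcz, PySem.Dict.empty]

-- A's result is the common shape
theorem pvA_eq_pvOut (text : String) : buildWordDict text = pvOut (pvWordsA text) := by
  unfold buildWordDict pvOut
  simp only []
  generalize pvWordsA text = ws
  have hA : (PySem.List.pyRange 1 (ws.length : Int) 1).foldl
      (fun wd i => pvUpdA wd (PySem.List.pyGetD ws (i - 1) "") (PySem.List.pyGetD ws i ""))
      PySem.Dict.empty
      = (ws.zip ws.tail).foldl (fun wd q => pvUpdA wd q.1 q.2) PySem.Dict.empty := by
    rw [← pv_zip_tail ws, List.foldl_map]
  rw [hA, pv_aloop_eq]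
  unfold pvCanon
  simp only [List.map_map, Function.comp_def]
  rw [pv_ofList_map_ofList]

-- B's result is the common shape
theorem pvB_eq_pvOut (text : String) : buildWordDict_alt text = pvOut (pvWordsA text) := by
  unfold buildWordDict_alt pvOut pvWordsA
  simp only [List.foldl_cons, List.foldl_nil, PySem.List.slice_from_one, PySem.List.dedup,
    PySem.Dict.foldl_insert_getD_add_one_eq_counter, PySem.Dict.getD_counter,
    show (" " ++ "," ++ " " : String) = " , " from rfl,
    show (" " ++ "." ++ " " : String) = " . " from rfl,
    show (" " ++ ";" ++ " " : String) = " ; " from rfl,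
    show (" " ++ ":" ++ " " : String) = " : " from rfl]

-- ===== VERDICT (by name: the statement is the Claim_ definition above) =====
theorem buildWordDict_spec : Claim_equal_buildWordDict := by
  intro text _
  unfold Spec_buildWordDict
  rw [pvA_eq_pvOut, pvB_eq_pvOut]
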